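-- pv_equiv track=rewrite | github.com/jyby/PrefixFreeCodes | functionsToTestPrefixFreeCodes.py | compressedTextLength
-- ===== SOURCE A (Python) =====
-- def compressedTextLength(L,W):
--     """Computes the lengths of a text which frequencies are given by
--     an array $W$, when it is compressed by a prefix free code
--     described by an array $L$ of pairs $(codeLenght_i,nbWeights_i)$.
--     """
--     compressedTextLength = 0
--     Ls = sorted(L, reverse=True)
--     Ws = sorted(W)
--     for (l,n) in Ls:
--         compressedTextLength += l*sum(Ws[0:n])
--         Ws = Ws[n:]
--     return compressedTextLength
-- ===== SOURCE B (Python) =====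
-- def compressedTextLength(L, W):
--     """Weighted text length: one prefix-sum array over the sorted weights,
--     consumed group by group with an index pointer."""
--     Ws = sorted(W)
--     prefix = [0]
--     for w in Ws:
--         prefix.append(prefix[-1] + w)
--     total = 0
--     i = 0
--     for (l, n) in sorted(L, reverse=True):
--         j = min(i + n, len(Ws))
--         total += l * (prefix[j] - prefix[i])
--         i = j
--     return total
-- ===== Notes on version B (the rewrite author's own statement) =====
-- stated objective: faster
-- what changed: Instead of re-slicing and re-summing the remaining sorted weight list for every code-length group, B builds one prefix-sum array over sorted(W) and consumes it with an index pointer; Pre_ excludes code-length pairs with a negative symbol count, where A's value comes from Python's negative-slice wraparound and is meaningless for a count.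
-- outside the precondition, e.g. on compressedTextLength([(2, -1)], [1, 2, 3]): A returns 6, B returns 12
import Mathlib
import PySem

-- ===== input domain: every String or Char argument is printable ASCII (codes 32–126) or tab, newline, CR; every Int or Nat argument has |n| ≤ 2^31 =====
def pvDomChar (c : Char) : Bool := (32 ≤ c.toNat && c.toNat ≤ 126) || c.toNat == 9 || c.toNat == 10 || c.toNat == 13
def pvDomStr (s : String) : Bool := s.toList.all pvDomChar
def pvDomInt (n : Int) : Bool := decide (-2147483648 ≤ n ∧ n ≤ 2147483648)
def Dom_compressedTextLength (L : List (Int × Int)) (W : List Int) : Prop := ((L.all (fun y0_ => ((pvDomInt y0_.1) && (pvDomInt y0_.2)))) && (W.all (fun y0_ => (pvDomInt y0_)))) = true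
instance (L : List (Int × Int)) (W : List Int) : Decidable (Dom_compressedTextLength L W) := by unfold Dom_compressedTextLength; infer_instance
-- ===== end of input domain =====

-- B replaces A's repeated slice-and-resum of the sorted weights by one prefix-sum
-- array consumed with an index pointer (objective: faster).

-- ===== PORT A =====
def compressedTextLength (L : List (Int × Int)) (W : List Int) : Int :=
  ((PySem.List.sorted2 L Prod.fst Prod.snd true).foldl
    (fun (st : Int × List Int) (p : Int × Int) =>
      (st.1 + p.1 * (PySem.List.slice st.2 (some 0) (some p.2)).sum,
       PySem.List.slice st.2 (some p.2) none))
    (0, PySem.List.sorted W (fun x => x) false)).1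

-- ===== PORT B =====
def compressedTextLength_alt (L : List (Int × Int)) (W : List Int) : Int :=
  let Ws := PySem.List.sorted W (fun x => x) false
  -- Source B's prefix list, built by appending prefix[-1] + w
  let P := Ws.foldl (fun (P : List Int) (w : Int) => P ++ [PySem.List.pyGetD P (-1) 0 + w]) [0]
  ((PySem.List.sorted2 L Prod.fst Prod.snd true).foldl
    (fun (st : Int × Int) (p : Int × Int) =>
      let j : Int := min (st.2 + p.2) (Ws.length : Int)
      (st.1 + p.1 * (PySem.List.pyGetD P j 0 - PySem.List.pyGetD P st.2 0), j))
    (0, 0)).1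

-- ===== PRECONDITION & SPEC =====
-- Pre_ excludes pairs with a negative symbol count n: a count is naturally ≥ 0, and on
-- negative n A's value is an accident of Python's negative-slice semantics (Ws[0:n] drops
-- the tail), not a weighted length; A still returns there, so one excluded example is cited.
def Pre_compressedTextLength (L : List (Int × Int)) (W : List Int) : Prop :=
  ∀ p ∈ L, 0 ≤ p.2
instance (L : List (Int × Int)) (W : List Int) : Decidable (Pre_compressedTextLength L W) := by
  unfold Pre_compressedTextLength; infer_instance

def pvWitness_compressedTextLength : (List (Int × Int)) × List Int := ([(2, 1), (1, 2)], [5, 3, 2])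

def Spec_compressedTextLength (L : List (Int × Int)) (W : List Int) (out : Int) : Prop :=
  out = compressedTextLength_alt L W
instance (L : List (Int × Int)) (W : List Int) (out : Int) : Decidable (Spec_compressedTextLength L W out) := by
  unfold Spec_compressedTextLength; infer_instance

-- ===== CLAIM =====
def Claim_equal_compressedTextLength : Prop :=
  ∀ (L : List (Int × Int)) (W : List Int), Dom_compressedTextLength L W →
    Pre_compressedTextLength L W → Spec_compressedTextLength L W (compressedTextLength L W)

-- ===== LEMMAS AND PROOFS =====

-- recursive characterisation of Source B's prefix list: pvPrefix ws s = [s, s+ws[0], …]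
def pvPrefix : List Int → Int → List Int
  | [], s => [s]
  | w :: ws, s => s :: pvPrefix ws (s + w)

lemma pvPrefix_foldl (ws : List Int) (xs : List Int) (s : Int) :
    ws.foldl (fun (P : List Int) (w : Int) => P ++ [PySem.List.pyGetD P (-1) 0 + w]) (xs ++ [s])
      = xs ++ pvPrefix ws s := by
  induction ws generalizing xs s with
  | nil => simp [pvPrefix]
  | cons w ws ih =>
    simp only [List.foldl_cons, PySem.List.pyGetD_neg_one_append_singleton]
    have h : xs ++ [s] ++ [s + w] = (xs ++ [s]) ++ [s + w] := by simp
    rw [h, ih (xs ++ [s]) (s + w)]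
    simp [pvPrefix]

-- P[j] = s + sum of the first j weights
lemma pvPrefix_getD (ws : List Int) (s : Int) (j : Nat) (hj : j ≤ ws.length) :
    (pvPrefix ws s).getD j 0 = s + (ws.take j).sum := by
  induction ws generalizing s j with
  | nil =>
    have hj0 : j = 0 := by simpa using hj
    subst hj0; simp [pvPrefix]
  | cons w ws ih =>
    cases j with
    | zero => simp [pvPrefix]
    | succ j =>
      simp only [pvPrefix, List.getD_cons_succ, List.take_succ_cons, List.sum_cons]
      rw [ih (s + w) j (by simpa using hj)]; ring

-- the loop-body correspondence, for pair lists whose counts are all nonnegative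
lemma pv_loop_eq (S : List Int) (ls : List (Int × Int)) (hls : ∀ p ∈ ls, 0 ≤ p.2)
    (c : Nat) (acc : Int) (hc : c ≤ S.length) :
    (ls.foldl
      (fun (st : Int × List Int) (p : Int × Int) =>
        (st.1 + p.1 * (PySem.List.slice st.2 (some 0) (some p.2)).sum,
         PySem.List.slice st.2 (some p.2) none))
      (acc, S.drop c)).1
    =
    (ls.foldl
      (fun (st : Int × Int) (p : Int × Int) =>
        let j : Int := min (st.2 + p.2) ((S.length : Nat) : Int)
        (st.1 + p.1 * (PySem.List.pyGetD (pvPrefix S 0) j 0 - PySem.List.pyGetD (pvPrefix S 0) st.2 0), j))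
      (acc, (c : Int))).1 := by
  induction ls generalizing c acc with
  | nil => simp
  | cons p ls ih =>
    obtain ⟨l, n⟩ := p
    have hn : 0 ≤ n := hls (l, n) (by simp)
    set jn : Nat := min (c + n.toNat) S.length with hjn
    have hjInt : min ((c : Int) + n) ((S.length : Nat) : Int) = ((jn : Nat) : Int) := by
      omega
    have htake : PySem.List.slice (S.drop c) (some 0) (some n) = (S.drop c).take n.toNat := by
      rw [PySem.List.slice_zero_start, PySem.List.slice_to _ hn]
    have hsum : ((S.drop c).take n.toNat).sum
        = PySem.List.pyGetD (pvPrefix S 0) ((jn : Nat) : Int) 0 - PySem.List.pyGetD (pvPrefix S 0) (c : Int) 0 := by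
      rw [PySem.List.pyGetD_natCast, PySem.List.pyGetD_natCast,
        pvPrefix_getD S 0 jn (by omega), pvPrefix_getD S 0 c (by omega)]
      have h1 : S.take jn = S.take (c + n.toNat) := by
        rcases le_or_gt (c + n.toNat) S.length with h | h
        · have : jn = c + n.toNat := by omega
          rw [this]
        · rw [List.take_of_length_le (by omega), List.take_of_length_le (le_of_lt h)]
      rw [h1, List.take_add, List.sum_append]; ring
    have hdrop : PySem.List.slice (S.drop c) (some n) none = S.drop jn := by
      rw [PySem.List.slice_from _ hn, List.drop_drop]
      rcases le_or_gt (c + n.toNat) S.length with h | h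
      · have h2 : jn = n.toNat + c := by omega
        rw [h2, Nat.add_comm]
      · rw [List.drop_eq_nil_of_le (le_of_lt (by omega)), List.drop_eq_nil_of_le (by omega)]
    simp only [List.foldl_cons, htake, hsum, hdrop, hjInt]
    exact ih (fun q hq => hls q (by simp [hq])) jn _ (by omega)

-- ===== VERDICT =====
theorem compressedTextLength_spec : Claim_equal_compressedTextLength := by
  intro L W _ hpre
  show compressedTextLength L W = compressedTextLength_alt L W
  unfold compressedTextLength compressedTextLength_alt
  simp only []
  have hP : (PySem.List.sorted W (fun x => x) false).foldl
      (fun (P : List Int) (w : Int) => P ++ [PySem.List.pyGetD P (-1) 0 + w]) [0]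
      = pvPrefix (PySem.List.sorted W (fun x => x) false) 0 := by
    have := pvPrefix_foldl (PySem.List.sorted W (fun x => x) false) [] 0
    simpa using this
  rw [hP]
  have hmem : ∀ p ∈ PySem.List.sorted2 L Prod.fst Prod.snd true, 0 ≤ p.2 := by
    intro p hp
    exact hpre p ((PySem.List.sorted2_perm L Prod.fst Prod.snd true).mem_iff.mp hp)
  have := pv_loop_eq (PySem.List.sorted W (fun x => x) false)
    (PySem.List.sorted2 L Prod.fst Prod.snd true) hmem 0 0 (Nat.zero_le _)
  simpa using this
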